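-- pv_equiv track=rewrite | github.com/Henrique281/validador-notas-fiscais | Validador_notas/analise.py | detectar_duplicadas
-- ===== SOURCE A (Python) =====
-- def detectar_duplicadas(notas):
--
--     numeros = set()
--     duplicadas = []
--
--     for nota in notas:
--
--         if nota["numero"] in numeros:
--             duplicadas.append(nota["numero"])
--
--         numeros.add(nota["numero"])
--
--     return duplicadas
-- ===== SOURCE B (Python) =====
-- def detectar_duplicadas(notas):
--     # Group the positions of each invoice number, drop the first position of
--     # every group, sort the remaining positions and read the numbers back.
--     posicoes = {}
--     for i, nota in enumerate(notas):
--         posicoes.setdefault(nota["numero"], []).append(i)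
--     indices = sorted(i for idxs in posicoes.values() for i in idxs[1:])
--     return [notas[i]["numero"] for i in indices]
-- ===== Notes on version B (the rewrite author's own statement) =====
-- stated objective: alternative
-- what changed: Replaced the single-pass seen-set filter by a group-then-select algorithm: one pass groups the positions of each number in a dict, then every group's first position is dropped, the surviving positions are sorted and mapped back to their numbers.
import Mathlib
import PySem

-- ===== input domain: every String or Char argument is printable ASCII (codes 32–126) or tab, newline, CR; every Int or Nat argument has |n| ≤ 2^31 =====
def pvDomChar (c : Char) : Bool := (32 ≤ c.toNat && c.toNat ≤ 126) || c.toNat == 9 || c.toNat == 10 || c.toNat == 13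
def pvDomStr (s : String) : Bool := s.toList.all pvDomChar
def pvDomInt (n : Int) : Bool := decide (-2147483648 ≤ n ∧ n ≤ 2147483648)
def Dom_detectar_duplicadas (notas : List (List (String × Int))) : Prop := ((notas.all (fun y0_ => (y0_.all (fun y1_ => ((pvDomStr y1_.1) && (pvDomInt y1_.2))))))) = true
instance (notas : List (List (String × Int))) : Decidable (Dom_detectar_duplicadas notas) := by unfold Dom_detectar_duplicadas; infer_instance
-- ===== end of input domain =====

-- B replaces A's single-pass seen-set filter by a group-then-select algorithm: group the
-- positions of each number, drop each group's first position, sort the rest, map back.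
-- Return-value equivalence is proved on inputs where every nota has the key "numero".

-- nota["numero"] (first match in the association list; the .getD 0 default is unreachable under Pre_)
def pvNumero (nota : List (String × Int)) : Int :=
  ((PySem.Dict.mk nota).get? "numero").getD 0

-- ===== PORT A =====
def pvAStep (st : PySem.Set Int × List Int) (nota : List (String × Int)) :
    PySem.Set Int × List Int :=
  let v := pvNumero nota
  (PySem.Set.add st.1 v, if PySem.Set.contains st.1 v then st.2 ++ [v] else st.2)

def detectar_duplicadas (notas : List (List (String × Int))) : List Int :=
  (notas.foldl pvAStep (PySem.Set.empty, [])).2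

-- ===== PORT B =====
def detectar_duplicadas_alt (notas : List (List (String × Int))) : List Int :=
  -- posicoes: for i, nota in enumerate(notas): posicoes.setdefault(nota["numero"], []).append(i)
  let posicoes := (PySem.List.enumerate notas 0).foldl
      (fun d p => PySem.Dict.modify d (pvNumero p.2) [] (fun l => l ++ [p.1]))
      PySem.Dict.empty
  -- indices = sorted(i for idxs in posicoes.values() for i in idxs[1:])
  let indices := PySem.List.sorted
      (posicoes.values.flatMap (fun idxs => PySem.List.slice idxs (some 1) none))
      (fun x => x) false
  -- [notas[i]["numero"] for i in indices]
  indices.map (fun i => pvNumero ((PySem.List.pyGet? notas i).getD []))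

-- ===== PRECONDITION & SPEC =====
-- Pre_ excludes exactly the inputs where some nota lacks the key "numero": there the Python A
-- (and B alike) raises KeyError.
def Pre_detectar_duplicadas (notas : List (List (String × Int))) : Prop :=
  (notas.all (fun nota => nota.any (fun p => p.1 == "numero"))) = true
instance (notas : List (List (String × Int))) : Decidable (Pre_detectar_duplicadas notas) := by
  unfold Pre_detectar_duplicadas; infer_instance

def pvWitness_detectar_duplicadas : (List (List (String × Int))) :=
  [[("numero", 1)], [("numero", 2)], [("numero", 1)]]

def Spec_detectar_duplicadas (notas : List (List (String × Int))) (out : List Int) : Prop := out = detectar_duplicadas_alt notas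
instance (notas : List (List (String × Int))) (out : List Int) : Decidable (Spec_detectar_duplicadas notas out) := by unfold Spec_detectar_duplicadas; infer_instance

-- ===== CLAIM (what is proved, stated in full; the proofs are below) =====
def Claim_equal_detectar_duplicadas : Prop := ∀ (notas : List (List (String × Int))), Dom_detectar_duplicadas notas → Pre_detectar_duplicadas notas → Spec_detectar_duplicadas notas (detectar_duplicadas notas)

-- ===== LEMMAS AND PROOFS =====

-- "has this number appeared strictly earlier": the canonical filter condition on an
-- enumerated pair, phrased on the full list notas.
def pvEarlier (notas : List (List (String × Int))) (p : Int × List (String × Int)) : Bool :=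
  (PySem.List.slice notas none (some p.1)).any (fun n => pvNumero n == pvNumero p.2)

lemma pv_contains_add (s : PySem.Set Int) (x v : Int) :
    PySem.Set.contains (PySem.Set.add s x) v = (PySem.Set.contains s v || x == v) := by
  rw [PySem.Set.add_eq_ite]
  split
  · next h =>
    by_cases h3 : x = v
    · subst h3; rw [(PySem.Set.contains_iff s x).2 h]; simp
    · simp [h3]
  · simp only [PySem.Set.contains_eq_listContains, List.contains_eq_mem]
    by_cases h2 : v ∈ s <;> by_cases h3 : x = v
    · subst h3; simp [List.mem_append]
    · simp [List.mem_append, h2, h3, fun a b : Int => @eq_comm Int a b]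
    · subst h3; simp [List.mem_append]
    · simp [List.mem_append, h2, h3, fun a b : Int => @eq_comm Int a b]

-- A's loop produces exactly the pvEarlier-filtered numbers, in order.
lemma pv_A_loop (rest pre : List (List (String × Int))) (s : PySem.Set Int) (acc : List Int)
    (hs : ∀ v, PySem.Set.contains s v = pre.any (fun n => pvNumero n == v)) :
    (rest.foldl pvAStep (s, acc)).2
      = acc ++ ((PySem.List.enumerate rest (pre.length : Int)).filter
          (pvEarlier (pre ++ rest))).map (fun p => pvNumero p.2) := by
  induction rest generalizing pre s acc with
  | nil => simp [PySem.List.enumerate]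
  | cons n rest ih =>
    rw [PySem.List.enumerate_cons]
    simp only [List.foldl_cons, List.filter_cons]
    have hcond : pvEarlier (pre ++ n :: rest) ((pre.length : Int), n)
        = PySem.Set.contains s (pvNumero n) := by
      unfold pvEarlier
      rw [PySem.List.slice_to_natCast, List.take_left, hs]
    have hpre : pre ++ n :: rest = (pre ++ [n]) ++ rest := by simp
    have hlen : ((pre.length : Int) + 1) = (((pre ++ [n]).length : Nat) : Int) := by simp
    have ih' := ih (pre ++ [n]) (PySem.Set.add s (pvNumero n))
      (if PySem.Set.contains s (pvNumero n) then acc ++ [pvNumero n] else acc)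
      (fun v => by rw [pv_contains_add, hs]; simp [List.any_append])
    rw [hcond, hpre, hlen]
    by_cases h : PySem.Set.contains s (pvNumero n)
    · simp only [h, if_true] at ih'
      simp only [pvAStep, h, if_true]
      rw [ih']
      simp
    · simp only [h] at ih'
      simp only [pvAStep, h]
      rw [ih']
      simp

lemma pv_A_eq_filter (notas : List (List (String × Int))) :
    detectar_duplicadas notas
      = ((PySem.List.enumerate notas 0).filter (pvEarlier notas)).map (fun p => pvNumero p.2) := by
  have := pv_A_loop notas [] PySem.Set.empty []
    (fun v => by simp [PySem.Set.contains, PySem.Set.empty])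
  simpa [detectar_duplicadas] using this

-- the grouping dict: lookup of v is the list of positions of v, in order.
lemma pv_pos_getD (notas : List (List (String × Int))) (v : Int) :
    ((PySem.List.enumerate notas 0).foldl
        (fun d p => PySem.Dict.modify d (pvNumero p.2) [] (fun l => l ++ [p.1]))
        PySem.Dict.empty).getD v []
      = ((PySem.List.enumerate notas 0).filter (fun p => pvNumero p.2 == v)).map (·.1) := by
  rw [show ((PySem.List.enumerate notas 0).foldl
        (fun d p => PySem.Dict.modify d (pvNumero p.2) [] (fun l => l ++ [p.1]))
        PySem.Dict.empty)
      = (((PySem.List.enumerate notas 0).map (fun p => (pvNumero p.2, p.1))).foldl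
        (fun d q => PySem.Dict.modify d q.1 [] (fun l => l ++ [q.2])) PySem.Dict.empty)
    from (List.foldl_map (f := fun p : Int × List (String × Int) => (pvNumero p.2, p.1))
        (g := fun d q => PySem.Dict.modify d q.1 [] (fun l => l ++ [q.2]))).symm]
  rw [PySem.Dict.getD_foldl_modify_append]
  simp only [PySem.Dict.getD_empty, List.nil_append, List.filter_map, List.map_map]
  rfl

-- per value: dropping the first position leaves exactly the pvEarlier positions of that value.
lemma pv_occ_drop (rest pre : List (List (String × Int))) (v : Int) :
    ((PySem.List.enumerate rest (pre.length : Int)).filter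
        (fun p => pvEarlier (pre ++ rest) p && (pvNumero p.2 == v)))
      = (if pre.any (fun n => pvNumero n == v)
          then (PySem.List.enumerate rest (pre.length : Int)).filter (fun p => pvNumero p.2 == v)
          else ((PySem.List.enumerate rest (pre.length : Int)).filter
                  (fun p => pvNumero p.2 == v)).drop 1) := by
  induction rest generalizing pre with
  | nil => simp [PySem.List.enumerate]
  | cons n rest ih =>
    rw [PySem.List.enumerate_cons]
    simp only [List.filter_cons]
    have hcond : pvEarlier (pre ++ n :: rest) ((pre.length : Int), n)
        = pre.any (fun m => pvNumero m == pvNumero n) := by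
      unfold pvEarlier
      rw [PySem.List.slice_to_natCast, List.take_left]
    have hpre : pre ++ n :: rest = (pre ++ [n]) ++ rest := by simp
    have hlen : ((pre.length : Int) + 1) = (((pre ++ [n]).length : Nat) : Int) := by simp
    have ih' := ih (pre ++ [n])
    rw [hcond, hpre, hlen, ih']
    by_cases hv : pvNumero n = v
    · subst hv
      by_cases hpv : pre.any (fun m => pvNumero m == pvNumero n) = true
      · simp [hpv, List.any_append]
      · simp [hpv, List.any_append]
    · have hnv : (pvNumero n == v) = false := by simp [hv]
      simp [hnv, List.any_append]


-- distinct keys partition a list by key value, up to permutation.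
lemma pv_partition {α κ : Type} [BEq κ] [LawfulBEq κ] (key : α → κ) (ks : List κ) (L : List α)
    (hnd : ks.Nodup) (hmem : ∀ x ∈ L, key x ∈ ks) :
    (ks.flatMap (fun k => L.filter (fun x => key x == k))).Perm L := by
  induction ks generalizing L with
  | nil =>
    have : L = [] := List.eq_nil_iff_forall_not_mem.2 (fun x hx => by simpa using hmem x hx)
    simp [this]
  | cons k ks ih =>
    rw [List.flatMap_cons]
    have hnd' : ks.Nodup := hnd.of_cons
    have hk : k ∉ ks := by simpa using (List.nodup_cons.1 hnd).1
    set L' := L.filter (fun x => !(key x == k)) with hL'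
    have hmem' : ∀ x ∈ L', key x ∈ ks := by
      intro x hx
      have h1 := hmem x (List.mem_of_mem_filter hx)
      have h2 : (key x == k) = false := by
        have := List.of_mem_filter hx
        simpa using this
      simp only [List.mem_cons] at h1
      rcases h1 with h1 | h1
      · rw [h1] at h2; simp at h2
      · exact h1
    have hsame : ∀ k' ∈ ks, L.filter (fun x => key x == k') = L'.filter (fun x => key x == k') := by
      intro k' hk'
      rw [hL', List.filter_filter]
      apply List.filter_congr
      intro x hx
      by_cases h : key x = k'
      · have : (key x == k) = false := by
          simp only [beq_eq_false_iff_ne, ne_eq]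
          intro hkk
          rw [hkk] at h
          exact hk (by rw [h]; exact hk')
        simp [h]
        intro e
        subst e
        simp [h] at this
      · simp [h]
    have hflat : ks.flatMap (fun k' => L.filter (fun x => key x == k'))
        = ks.flatMap (fun k' => L'.filter (fun x => key x == k')) := by
      rw [List.flatMap_def, List.flatMap_def]
      exact congrArg List.flatten (List.map_congr_left hsame)
    rw [hflat]
    have hperm := ih L' hnd' hmem'
    exact (hperm.append_left (L.filter (fun x => key x == k))).trans
      (List.filter_append_perm (fun x => key x == k) L)

-- B computes the same pvEarlier-filtered numbers.
lemma pv_B_eq_filter (notas : List (List (String × Int))) :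
    detectar_duplicadas_alt notas
      = ((PySem.List.enumerate notas 0).filter (pvEarlier notas)).map (fun p => pvNumero p.2) := by
  show (PySem.List.sorted
      (((PySem.List.enumerate notas 0).foldl
          (fun d p => PySem.Dict.modify d (pvNumero p.2) [] (fun l => l ++ [p.1]))
          PySem.Dict.empty).values.flatMap (fun idxs => PySem.List.slice idxs (some 1) none))
      (fun x => x) false).map (fun i => pvNumero ((PySem.List.pyGet? notas i).getD []))
    = ((PySem.List.enumerate notas 0).filter (pvEarlier notas)).map (fun p => pvNumero p.2)
  set P := PySem.List.enumerate notas 0 with hP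
  set pos := P.foldl
      (fun d p => PySem.Dict.modify d (pvNumero p.2) [] (fun l => l ++ [p.1]))
      PySem.Dict.empty with hpos
  set Sp := P.filter (pvEarlier notas) with hSp
  have hnodup : pos.keys.Nodup := by
    rw [hpos]
    exact PySem.Dict.nodup_keys_foldl_modify_key P (fun p => pvNumero p.2) []
      (fun _ p => fun l => l ++ [p.1]) PySem.Dict.empty PySem.Dict.nodup_keys_empty
  have hvalues : pos.values = pos.keys.map (fun v => pos.getD v []) :=
    PySem.Dict.values_eq_map_keys pos hnodup []
  have hkmem : ∀ p ∈ Sp, pvNumero p.2 ∈ pos.keys := by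
    intro p hp
    rw [hpos, PySem.Dict.keys_foldl_modify_key, PySem.Dict.keys_empty,
      PySem.Set.update_nil_left, PySem.Set.mem_ofList]
    exact List.mem_map_of_mem (List.mem_of_mem_filter hp)
  -- per value: dropping the first position = the pvEarlier positions of that value
  have hdrop : ∀ v, (pos.getD v []).drop 1 = (Sp.filter (fun p => pvNumero p.2 == v)).map (·.1) := by
    intro v
    rw [hpos, pv_pos_getD, ← hP, ← List.map_drop]
    have h0 := pv_occ_drop notas [] v
    simp only [List.length_nil, Nat.cast_zero, List.nil_append, List.any_nil,
      Bool.false_eq_true, if_false] at h0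
    rw [← hP] at h0
    rw [← h0]
    congr 1
    rw [hSp, List.filter_filter]
    apply List.filter_congr
    intro p _
    exact Bool.and_comm _ _
  -- the flattened dropped positions are a permutation of the pvEarlier positions
  have hperm : (pos.values.flatMap (fun idxs => PySem.List.slice idxs (some 1) none)).Perm
      (Sp.map (·.1)) := by
    rw [hvalues, List.flatMap_map]
    have : (fun v => PySem.List.slice (pos.getD v []) (some 1) none)
        = fun v => (Sp.filter (fun p => pvNumero p.2 == v)).map (·.1) := by
      funext v
      rw [PySem.List.slice_from_one, ← List.drop_one, hdrop]
    rw [this]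
    have := pv_partition (fun p => pvNumero p.2) pos.keys Sp hnodup hkmem
    have hmapped := this.map (·.1)
    rw [List.map_flatMap] at hmapped
    exact hmapped
  -- the pvEarlier positions are strictly increasing, so sorting names them
  have hpair : (Sp.map (·.1)).Pairwise (· < ·) := by
    rw [List.pairwise_map]
    exact (PySem.List.pairwise_lt_enumerate notas 0).sublist (List.filter_sublist)
  have hsorted : PySem.List.sorted
      (pos.values.flatMap (fun idxs => PySem.List.slice idxs (some 1) none))
      (fun x => x) false = Sp.map (·.1) :=
    PySem.List.sorted_eq_of_perm_of_pairwise_lt _ _ _ hperm.symm hpair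
  rw [hsorted, List.map_map]
  apply List.map_congr_left
  intro p hp
  have hpP : p ∈ P := List.mem_of_mem_filter hp
  rw [hP, PySem.List.mem_enumerate_iff] at hpP
  obtain ⟨k, hk, rfl⟩ := hpP
  simp [PySem.List.pyGet?_natCast, List.getElem?_eq_getElem hk]

-- ===== VERDICT (by name: the statement is the Claim_ definition above) =====
theorem detectar_duplicadas_spec : Claim_equal_detectar_duplicadas := by
  intro notas _ _
  show detectar_duplicadas notas = detectar_duplicadas_alt notas
  rw [pv_A_eq_filter, pv_B_eq_filter]
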